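-- pv_equiv track=rewrite | github.com/JohnScolaro/advent-of-code | 2021/day11/day11.py | part_a
-- ===== SOURCE A (Python) =====
-- adj = [(1, 1), (1, 0), (1, -1), (0, -1), (0, 1), (-1, -1), (-1, 0), (-1, 1)]
--
-- def increase_all_by_one(inputs):
--     for r in range(len(inputs)):
--         for c in range(len(inputs[r])):
--             inputs[r][c] += 1
--
-- def handle_explodes(inputs):
--     num_explodes = 0
--     for r in range(len(inputs)):
--         for c in range(len(inputs[r])):
--             if inputs[r][c] > 9:
--                 inputs[r][c] = 0
--                 num_explodes += 1
--                 for dx, dy in adj: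
--                     r2 = r + dx
--                     c2 = c + dy
--                     if r2 < 0 or r2 >= len(inputs):
--                         continue
--                     if c2 < 0 or c2 >= len(inputs[0]):
--                         continue
--                     if inputs[r2][c2] == 0:
--                         continue
--                     else:
--                         inputs[r2][c2] += 1
--     return num_explodes
--
-- def part_a(lines) -> int:
--     explodes = 0
--     for i in range(100):
--         increase_all_by_one(lines)
--         explodes_this_time = 0
--         while True:
--             new_explodes = handle_explodes(lines)
--             if new_explodes == 0:
--                 break
--             explodes_this_time += new_explodes
--         explodes += explodes_this_time
--     return explodes
-- ===== SOURCE B (Python) =====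
-- # Faster octopus simulation: one bump pass, then a stack-driven flood fill that
-- # processes each flash exactly once (no rescanning of the whole grid per round).
-- # Note: like A, mutates `lines` in place; equivalence is about the return value.
-- def part_a(lines) -> int:
--     total = 0
--     for _ in range(100):
--         for r in range(len(lines)):
--             for c in range(len(lines[r])):
--                 lines[r][c] += 1
--         stack = []
--         for r in range(len(lines)):
--             for c in range(len(lines[r])):
--                 if lines[r][c] > 9:
--                     stack.append((r, c))
--         while stack:
--             r, c = stack.pop()
--             if lines[r][c] <= 9:
--                 continue
--             lines[r][c] = 0
--             total += 1
--             for dr in (-1, 0, 1):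
--                 for dc in (-1, 0, 1):
--                     if dr == 0 and dc == 0:
--                         continue
--                     r2, c2 = r + dr, c + dc
--                     if 0 <= r2 < len(lines) and 0 <= c2 < len(lines[r2]):
--                         if lines[r2][c2] != 0:
--                             lines[r2][c2] += 1
--                             if lines[r2][c2] > 9:
--                                 stack.append((r2, c2))
--     return total
-- ===== Notes on version B (the rewrite author's own statement) =====
-- stated objective: faster
-- what changed: replaces A's repeated full-grid rescan passes (rescanning all cells until a whole pass finds no flash) with one bump pass plus a stack-driven flood fill that visits each flash once; Pre_ excludes ragged grids on which a flash can occur, out-of-contract inputs where A applies row 0's length as the neighbour bound for every row and so usually raises IndexError (never-flashing ragged grids, all cells <= -91, are kept)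
-- outside the precondition, e.g. on part_a([[9], [5, 3, 5, 1], [9, 3], [2, 8]]): A returns 105, B returns 129; on part_a([[0, 9], [9]]): A raises IndexError, B returns 33
import Mathlib
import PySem

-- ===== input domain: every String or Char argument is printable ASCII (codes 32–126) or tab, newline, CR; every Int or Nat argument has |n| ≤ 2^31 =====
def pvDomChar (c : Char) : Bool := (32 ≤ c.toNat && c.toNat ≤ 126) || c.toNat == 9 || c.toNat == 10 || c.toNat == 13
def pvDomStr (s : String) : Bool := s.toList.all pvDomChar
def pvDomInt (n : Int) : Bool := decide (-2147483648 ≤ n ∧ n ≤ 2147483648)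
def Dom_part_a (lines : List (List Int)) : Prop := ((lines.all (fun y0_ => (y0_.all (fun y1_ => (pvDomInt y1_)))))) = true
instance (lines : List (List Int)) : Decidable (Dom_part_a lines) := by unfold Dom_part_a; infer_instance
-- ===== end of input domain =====

-- B replaces A's repeated full-grid rescan passes with one bump pass plus a stack
-- flood fill processing each flash once (faster). Both Pythons mutate `lines` in
-- place; the equivalence proved here is about the return value only.

-- ===== shared grid primitives (lines[r][c] reads/writes, 0 outside the grid) =====
def cellI (g : List (List Int)) (r c : Int) : Int :=
  if r < 0 ∨ c < 0 then 0 else (g.getD r.toNat []).getD c.toNat 0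

def setCellI (g : List (List Int)) (r c : Int) (v : Int) : List (List Int) :=
  if r < 0 ∨ c < 0 then g else g.set r.toNat ((g.getD r.toNat []).set c.toNat v)

def shape (g : List (List Int)) : List Nat := g.map List.length

-- row-major positions `for r in range(len(g)): for c in range(len(g[r]))`
def posList (sh : List Nat) : List (Int × Int) :=
  (List.range sh.length).flatMap (fun r => (List.range (sh.getD r 0)).map (fun c => ((r : Int), (c : Int))))

-- number of nonzero cells; used only as fuel for the two while-loops
def nonzeroCount (g : List (List Int)) : Nat :=
  (posList (shape g)).countP (fun p => decide (cellI g p.1 p.2 ≠ 0))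

-- ===== PORT A =====
def adjA : List (Int × Int) := [(1,1),(1,0),(1,-1),(0,-1),(0,1),(-1,-1),(-1,0),(-1,1)]

def increaseAll (g : List (List Int)) : List (List Int) := g.map (fun row => row.map (· + 1))

def nbrStepA (p : Int × Int) (u : List (List Int)) (d : Int × Int) : List (List Int) :=
  let r2 := p.1 + d.1
  let c2 := p.2 + d.2
  if r2 < 0 ∨ (u.length : Int) ≤ r2 then u
  else if c2 < 0 ∨ ((u.headD []).length : Int) ≤ c2 then u
  else if cellI u r2 c2 = 0 then u
  else setCellI u r2 c2 (cellI u r2 c2 + 1)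

def passStepA (s : List (List Int) × Int) (p : Int × Int) : List (List Int) × Int :=
  if 9 < cellI s.1 p.1 p.2 then
    (adjA.foldl (nbrStepA p) (setCellI s.1 p.1 p.2 0), s.2 + 1)
  else s

def handleExplodes (g : List (List Int)) : List (List Int) × Int :=
  (posList (shape g)).foldl passStepA (g, 0)

-- `while True: … if new_explodes == 0: break`; fuel only makes the loop structural
def loopA : Nat → List (List Int) → Int → List (List Int) × Int
  | 0, g, acc => (g, acc)
  | f + 1, g, acc =>
    let r := handleExplodes g
    if r.2 = 0 then (r.1, acc) else loopA f r.1 (acc + r.2)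

def part_a (lines : List (List Int)) : Int :=
  ((List.range 100).foldl (fun s _ =>
      let g1 := increaseAll s.1
      let r := loopA (nonzeroCount g1 + 1) g1 0
      (r.1, s.2 + r.2)) (lines, 0)).2

-- ===== PORT B =====
def nbrOffsets : List (Int × Int) := [(-1,-1),(-1,0),(-1,1),(0,-1),(0,1),(1,-1),(1,0),(1,1)]

def flashStepB (p : Int × Int) (s : List (List Int) × List (Int × Int)) (d : Int × Int) :
    List (List Int) × List (Int × Int) :=
  let r2 := p.1 + d.1
  let c2 := p.2 + d.2
  if 0 ≤ r2 ∧ r2 < (s.1.length : Int) ∧ 0 ≤ c2 ∧ c2 < ((s.1.getD r2.toNat []).length : Int) then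
    if cellI s.1 r2 c2 ≠ 0 then
      (setCellI s.1 r2 c2 (cellI s.1 r2 c2 + 1),
       if 9 < cellI s.1 r2 c2 + 1 then (r2, c2) :: s.2 else s.2)
    else s
  else s

-- `while stack:` pop, skip already-flashed, flash and push newly-ready neighbours
def floodB : Nat → List (List Int) × List (Int × Int) → Int → List (List Int) × Int
  | 0, s, total => (s.1, total)
  | _ + 1, (g, []), total => (g, total)
  | f + 1, (g, p :: rest), total =>
    if cellI g p.1 p.2 ≤ 9 then floodB f (g, rest) total
    else floodB f (nbrOffsets.foldl (flashStepB p) (setCellI g p.1 p.2 0, rest)) (total + 1)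

def part_a_alt (lines : List (List Int)) : Int :=
  ((List.range 100).foldl (fun s _ =>
      let g1 := s.1.map (fun row => row.map (· + 1))
      let st := (posList (shape g1)).foldl
        (fun st p => if 9 < cellI g1 p.1 p.2 then p :: st else st) ([] : List (Int × Int))
      let r := floodB (9 * nonzeroCount g1 + st.length + 1) (g1, st) 0
      (r.1, s.2 + r.2)) (lines, 0)).2

-- ===== PRECONDITION & SPEC =====
-- Pre_ excludes ragged grids (rows of unequal length) on which a flash can occur:
-- out-of-contract inputs, where A applies row 0's length as the neighbour-column bound
-- for every row and so usually raises IndexError; ragged grids that can never flash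
-- (every cell ≤ -91, so 100 increments never push any cell past 9) are kept.
def Pre_part_a (lines : List (List Int)) : Prop :=
  (∀ row ∈ lines, row.length = (lines.headD []).length) ∨
  (∀ row ∈ lines, ∀ v ∈ row, v ≤ -91)
instance (lines : List (List Int)) : Decidable (Pre_part_a lines) := by unfold Pre_part_a; infer_instance

def pvWitness_part_a : List (List Int) := [[1, 9, 3], [0, 8, 5]]

def Spec_part_a (lines : List (List Int)) (out : Int) : Prop := out = part_a_alt lines
instance (lines : List (List Int)) (out : Int) : Decidable (Spec_part_a lines out) := by unfold Spec_part_a; infer_instance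

-- ===== CLAIM (what is proved, stated in full; the proofs are below) =====
def Claim_equal_part_a : Prop := ∀ (lines : List (List Int)), Dom_part_a lines → Pre_part_a lines → Spec_part_a lines (part_a lines)

-- ===== LEMMAS AND PROOFS =====

-- in-range predicate for a cell
def InR (g : List (List Int)) (r c : Int) : Prop :=
  0 ≤ r ∧ r.toNat < g.length ∧ 0 ≤ c ∧ c.toNat < (g.getD r.toNat []).length


theorem cellI_of_not_inR (g : List (List Int)) (r c : Int) (h : ¬ InR g r c) :
    cellI g r c = 0 := by
  unfold InR at h
  unfold cellI
  split
  · rfl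
  · rename_i hneg
    push Not at hneg
    simp only [List.getD_eq_getElem?_getD]
    rcases Nat.lt_or_ge r.toNat g.length with hr | hr
    · rcases Nat.lt_or_ge c.toNat (g.getD r.toNat []).length with hc | hc
      · exact absurd ⟨hneg.1, hr, hneg.2, hc⟩ h
      · rw [List.getD_eq_getElem?_getD] at hc
        rw [List.getElem?_eq_none (by omega)]
        rfl
    · rw [List.getElem?_eq_none hr]
      rfl

theorem cellI_set_self (g : List (List Int)) (r c v : Int) (h : InR g r c) :
    cellI (setCellI g r c v) r c = v := by
  obtain ⟨hr0, hr, hc0, hc⟩ := h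
  unfold cellI setCellI
  rw [if_neg (by omega), if_neg (by omega)]
  simp only [List.getD_eq_getElem?_getD]
  rw [List.getElem?_set_self (by simpa using hr)]
  simp only [Option.getD_some]
  rw [List.getElem?_set_self]
  · rfl
  · simpa [List.getD_eq_getElem?_getD] using hc

theorem cellI_set_ne (g : List (List Int)) (r c v x y : Int) (h : (x, y) ≠ (r, c)) :
    cellI (setCellI g r c v) x y = cellI g x y := by
  unfold setCellI
  split
  · rfl
  · rename_i hneg
    push Not at hneg
    by_cases hlen : g.length ≤ r.toNat
    · rw [List.set_eq_of_length_le hlen]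
    · unfold cellI
      split
      · rfl
      · rename_i hneg2
        push Not at hneg2
        simp only [List.getD_eq_getElem?_getD]
        by_cases hxr : x = r
        · subst hxr
          rw [List.getElem?_set_self (by omega)]
          simp only [Option.getD_some]
          rw [List.getElem?_set_ne (show c.toNat ≠ y.toNat by
            intro hyc
            exact h (by rw [Prod.mk.injEq]; omega))]
        · rw [List.getElem?_set_ne (by omega)]

theorem shape_length (g : List (List Int)) : (shape g).length = g.length := by
  simp [shape]

theorem shape_getD (g : List (List Int)) (r : Nat) :
    (shape g).getD r 0 = (g.getD r []).length := by
  simp only [shape, List.getD_eq_getElem?_getD, List.getElem?_map]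
  cases g[r]? <;> rfl

theorem shape_headD (g : List (List Int)) : (shape g).headD 0 = (g.headD []).length := by
  cases g <;> rfl

theorem shape_setCellI (g : List (List Int)) (r c v : Int) :
    shape (setCellI g r c v) = shape g := by
  unfold setCellI
  split
  · rfl
  · unfold shape
    rw [List.map_set]
    apply List.ext_getElem?
    intro i
    rw [List.getElem?_set]
    split
    · rename_i hi
      subst hi
      split
      · rename_i hr
        simp [List.getD_eq_getElem?_getD, List.getElem?_map,
          List.getElem?_eq_getElem (show r.toNat < g.length by simpa using hr)]
      · rename_i hr
        rw [List.getElem?_eq_none (by simpa using hr)]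
    · rfl

theorem mem_posList (sh : List Nat) (x y : Int) :
    (x, y) ∈ posList sh ↔ 0 ≤ x ∧ x.toNat < sh.length ∧ 0 ≤ y ∧ y.toNat < sh.getD x.toNat 0 := by
  unfold posList
  constructor
  · intro hmem
    simp at hmem
    obtain ⟨r, hr, ⟨a, ha, rfl⟩, rfl⟩ := hmem
    simp only [Int.toNat_natCast]
    refine ⟨by omega, hr, by omega, ?_⟩
    simpa [List.getD_eq_getElem?_getD] using ha
  · rintro ⟨hx0, hx, hy0, hy⟩
    simp
    exact ⟨x.toNat, hx, ⟨y.toNat, by simpa [List.getD_eq_getElem?_getD] using hy, by omega⟩, by omega⟩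

theorem inR_iff_mem_posList (g : List (List Int)) (x y : Int) :
    InR g x y ↔ (x, y) ∈ posList (shape g) := by
  rw [mem_posList, shape_length, shape_getD]
  rfl

theorem enabled_inR (g : List (List Int)) (x y : Int) (h : cellI g x y ≠ 0) : InR g x y := by
  by_contra hc
  exact h (cellI_of_not_inR g x y hc)

theorem grid_ext (g1 g2 : List (List Int)) (hsh : shape g1 = shape g2)
    (hc : ∀ x y : Int, cellI g1 x y = cellI g2 x y) : g1 = g2 := by
  apply List.ext_getElem
  · have := congrArg List.length hsh
    simpa [shape] using this
  · intro i h1 h2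
    apply List.ext_getElem
    · have := congrArg (fun l => l[i]?) hsh
      simpa [shape, List.getElem?_map, List.getElem?_eq_getElem h1,
        List.getElem?_eq_getElem h2] using this
    · intro j hj1 hj2
      have := hc (i : Int) (j : Int)
      unfold cellI at this
      rw [if_neg (by omega), if_neg (by omega)] at this
      simpa [List.getD_eq_getElem?_getD, List.getElem?_eq_getElem h1,
        List.getElem?_eq_getElem h2, List.getElem?_eq_getElem hj1,
        List.getElem?_eq_getElem hj2] using this

-- ===== the one-flash rewrite step, in closed form, and its chaotic iteration =====

-- q is one of the 8 neighbours of p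
def nbrB (p q : Int × Int) : Bool :=
  q != p && (q.1 - p.1 ≤ 1 : Bool) && (p.1 - q.1 ≤ 1 : Bool) && (q.2 - p.2 ≤ 1 : Bool) && (p.2 - q.2 ≤ 1 : Bool)

-- flash cell p: p becomes 0, every in-range nonzero neighbour is bumped by 1
def specFlash (g : List (List Int)) (p : Int × Int) : List (List Int) :=
  g.mapIdx (fun r row => row.mapIdx (fun c v =>
    if ((r : Int), (c : Int)) = p then 0
    else if nbrB p ((r : Int), (c : Int)) && (v != 0) then v + 1 else v))

theorem shape_specFlash (g : List (List Int)) (p : Int × Int) :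
    shape (specFlash g p) = shape g := by
  unfold shape specFlash
  apply List.ext_getElem?
  intro i
  simp only [List.getElem?_map, List.getElem?_mapIdx]
  cases g[i]? <;> simp

theorem inR_specFlash (g : List (List Int)) (p : Int × Int) (x y : Int) :
    InR (specFlash g p) x y ↔ InR g x y := by
  rw [inR_iff_mem_posList, inR_iff_mem_posList, shape_specFlash]

theorem cellI_specFlash (g : List (List Int)) (p : Int × Int) (x y : Int) :
    cellI (specFlash g p) x y =
      if (x, y) = p then 0
      else if nbrB p (x, y) && (cellI g x y != 0) then cellI g x y + 1 else cellI g x y := by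
  by_cases hin : InR g x y
  · obtain ⟨hx0, hx, hy0, hy⟩ := hin
    have hx' : ((x.toNat : Int)) = x := by omega
    have hy' : ((y.toNat : Int)) = y := by omega
    have hcg : cellI g x y = ((g.getD x.toNat []).getD y.toNat 0) := by
      unfold cellI; rw [if_neg (by omega)]
    unfold cellI specFlash
    rw [if_neg (by omega)]
    simp only [List.getD_eq_getElem?_getD, List.getElem?_mapIdx,
      List.getElem?_eq_getElem hx]
    simp only [Option.map_some, Option.getD_some]
    have hy2 : y.toNat < (g[x.toNat]'hx).length := by
      simpa [List.getD_eq_getElem?_getD, List.getElem?_eq_getElem hx] using hy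
    simp only [List.getElem?_mapIdx, List.getElem?_eq_getElem hy2, Option.map_some,
      Option.getD_some, hx', hy']
    rw [if_neg (show ¬(x < 0 ∨ y < 0) by omega)]
  · have h1 : cellI g x y = 0 := cellI_of_not_inR _ _ _ hin
    have h2 : cellI (specFlash g p) x y = 0 :=
      cellI_of_not_inR _ _ _ (fun hc => hin ((inR_specFlash g p x y).mp hc))
    rw [h1, h2]
    split
    · rfl
    · simp

-- conditional bump of one cell, and of a list of cells
def incIf (g : List (List Int)) (q : Int × Int) : List (List Int) :=
  if cellI g q.1 q.2 ≠ 0 then setCellI g q.1 q.2 (cellI g q.1 q.2 + 1) else g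

def bumpList (g : List (List Int)) (l : List (Int × Int)) : List (List Int) :=
  l.foldl incIf g

theorem shape_incIf (g : List (List Int)) (q : Int × Int) : shape (incIf g q) = shape g := by
  unfold incIf
  split
  · exact shape_setCellI _ _ _ _
  · rfl

theorem shape_bumpList (g : List (List Int)) (l : List (Int × Int)) :
    shape (bumpList g l) = shape g := by
  induction l generalizing g with
  | nil => rfl
  | cons q l ih => rw [bumpList, List.foldl_cons, ← bumpList, ih, shape_incIf]

theorem cellI_incIf_ne (g : List (List Int)) (q : Int × Int) (x y : Int)
    (h : (x, y) ≠ q) : cellI (incIf g q) x y = cellI g x y := by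
  unfold incIf
  split
  · exact cellI_set_ne _ _ _ _ _ _ (by rcases q with ⟨a, b⟩; exact h)
  · rfl

theorem cellI_incIf_self (g : List (List Int)) (q : Int × Int) :
    cellI (incIf g q) q.1 q.2 =
      if cellI g q.1 q.2 ≠ 0 then cellI g q.1 q.2 + 1 else cellI g q.1 q.2 := by
  unfold incIf
  split
  · rename_i h
    exact cellI_set_self _ _ _ _ (enabled_inR _ _ _ h)
  · rfl

theorem bumpList_cell (g : List (List Int)) (l : List (Int × Int)) (hnd : l.Nodup)
    (x y : Int) :
    cellI (bumpList g l) x y =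
      if (x, y) ∈ l ∧ cellI g x y ≠ 0 then cellI g x y + 1 else cellI g x y := by
  induction l generalizing g with
  | nil => simp [bumpList]
  | cons q l ih =>
    rw [bumpList, List.foldl_cons, ← bumpList]
    rw [ih _ (hnd.of_cons)]
    by_cases hm : (x, y) = q
    · subst hm
      have hnot : (x, y) ∉ l := by
        intro hc; exact (List.nodup_cons.mp hnd).1 hc
      rw [if_neg (by intro hc; exact hnot hc.1)]
      rw [cellI_incIf_self g (x, y)]
      by_cases h0 : cellI g x y ≠ 0
      · rw [if_pos h0, if_pos ⟨List.mem_cons_self, h0⟩]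
      · rw [if_neg h0, if_neg (by intro hc; exact h0 hc.2)]
    · rw [cellI_incIf_ne g q x y hm]
      have hiff : ((x, y) ∈ q :: l) ↔ ((x, y) ∈ l) := by
        simp [List.mem_cons, hm]
      simp only [hiff]

-- counting helpers
theorem countP_lt_of_pointwise {α : Type} (l : List α) (pb qb : α → Bool)
    (h : ∀ a ∈ l, pb a = true → qb a = true) (a : α) (ha : a ∈ l)
    (hpa : pb a = false) (hqa : qb a = true) : l.countP pb < l.countP qb := by
  obtain ⟨s, t, rfl⟩ := List.append_of_mem ha
  rw [List.countP_append, List.countP_append, List.countP_cons, List.countP_cons]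
  have h1 : s.countP pb ≤ s.countP qb :=
    List.countP_mono_left (fun a ha => h a (by simp [ha]))
  have h2 : t.countP pb ≤ t.countP qb :=
    List.countP_mono_left (fun a ha => h a (by simp [ha]))
  simp [hpa, hqa]
  omega

theorem nonzero_congr (g g' : List (List Int)) (hsh : shape g' = shape g) :
    nonzeroCount g' = (posList (shape g)).countP (fun p => decide (cellI g' p.1 p.2 ≠ 0)) := by
  unfold nonzeroCount
  rw [hsh]

theorem nonzero_specFlash_lt (g : List (List Int)) (p : Int × Int)
    (h : 9 < cellI g p.1 p.2) : nonzeroCount (specFlash g p) < nonzeroCount g := by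
  rw [nonzero_congr g (specFlash g p) (shape_specFlash g p)]
  unfold nonzeroCount
  apply countP_lt_of_pointwise _ _ _ ?_ p
  · rw [← inR_iff_mem_posList]
    exact enabled_inR _ _ _ (by omega)
  · rcases p with ⟨a, b⟩
    simp [cellI_specFlash]
  · simp only [decide_eq_true_eq]
    omega
  · intro q hq
    simp only [decide_eq_true_eq]
    intro hne
    rcases q with ⟨a, b⟩
    rw [cellI_specFlash] at hne
    by_cases h1 : ((a : Int), (b : Int)) = p
    · rw [if_pos h1] at hne; exact absurd rfl hne
    · rw [if_neg h1] at hne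
      split at hne
      · rename_i hcond
        intro hc
        simp [hc] at hcond
      · exact hne

-- first cell ready to flash, in row-major order
def findEnabled (g : List (List Int)) : Option (Int × Int) :=
  (posList (shape g)).find? (fun p => decide (9 < cellI g p.1 p.2))

theorem findEnabled_some_enabled (g : List (List Int)) (p : Int × Int)
    (h : findEnabled g = some p) : 9 < cellI g p.1 p.2 := by
  have := List.find?_some h
  simpa using this

theorem findEnabled_none (g : List (List Int)) (h : findEnabled g = none)
    (x y : Int) : cellI g x y ≤ 9 := by
  by_contra hc
  push Not at hc
  have hmem : (x, y) ∈ posList (shape g) :=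
    (inR_iff_mem_posList g x y).mp (enabled_inR _ _ _ (by omega))
  have := List.find?_eq_none.mp h _ hmem
  simp at this
  omega

-- run all flashes to quiescence, flashing the first ready cell each time
def specStep (g : List (List Int)) : List (List Int) × Int :=
  match hf : findEnabled g with
  | none => (g, 0)
  | some p =>
    let r := specStep (specFlash g p)
    (r.1, r.2 + 1)
termination_by nonzeroCount g
decreasing_by
  exact nonzero_specFlash_lt g p (findEnabled_some_enabled g p hf)

theorem specStep_none (g : List (List Int)) (h : findEnabled g = none) :
    specStep g = (g, 0) := by
  rw [specStep.eq_def, h]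

theorem specStep_some (g : List (List Int)) (p : Int × Int) (h : findEnabled g = some p) :
    specStep g = ((specStep (specFlash g p)).1, (specStep (specFlash g p)).2 + 1) := by
  rw [specStep.eq_def, h]

-- two ready cells may flash in either order (local diamond)
theorem flash_comm (g : List (List Int)) (p q : Int × Int) (hpq : p ≠ q)
    (hp : 9 < cellI g p.1 p.2) (hq : 9 < cellI g q.1 q.2) :
    specFlash (specFlash g p) q = specFlash (specFlash g q) p := by
  apply grid_ext
  · rw [shape_specFlash, shape_specFlash, shape_specFlash, shape_specFlash]
  · intro x y
    have hp0 : cellI g p.1 p.2 ≠ 0 := by omega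
    have hq0 : cellI g q.1 q.2 ≠ 0 := by omega
    rcases p with ⟨p1, p2⟩
    rcases q with ⟨q1, q2⟩
    simp only [cellI_specFlash]
    split_ifs <;>
      simp_all [nbrB, Prod.mk.injEq, Bool.and_eq_true, bne_iff_ne, decide_eq_true_eq]

-- flashing ANY ready cell first computes the same quiescent grid and count
theorem specStep_exchange : ∀ n (g : List (List Int)) (p : Int × Int),
    nonzeroCount g = n → 9 < cellI g p.1 p.2 →
    specStep g = ((specStep (specFlash g p)).1, (specStep (specFlash g p)).2 + 1) := by
  intro n
  induction n using Nat.strong_induction_on with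
  | _ n ih =>
    intro g p hn hp
    cases hfe : findEnabled g with
    | none =>
      exact absurd (findEnabled_none g hfe p.1 p.2) (by omega)
    | some q =>
      by_cases hqp : q = p
      · subst hqp; exact specStep_some g q hfe
      · have hq : 9 < cellI g q.1 q.2 := findEnabled_some_enabled g q hfe
        have hpf : 9 < cellI (specFlash g q) p.1 p.2 := by
          obtain ⟨p1, p2⟩ := p
          obtain ⟨q1, q2⟩ := q
          simp only [cellI_specFlash]
          split_ifs <;> simp_all [Prod.mk.injEq] <;> omega
        have hqf : 9 < cellI (specFlash g p) q.1 q.2 := by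
          obtain ⟨p1, p2⟩ := p
          obtain ⟨q1, q2⟩ := q
          simp only [cellI_specFlash]
          split_ifs <;> simp_all [Prod.mk.injEq] <;> omega
        have hlt1 : nonzeroCount (specFlash g q) < n := hn ▸ nonzero_specFlash_lt g q hq
        have hlt2 : nonzeroCount (specFlash g p) < n := hn ▸ nonzero_specFlash_lt g p hp
        have e1 := specStep_some g q hfe
        have e2 := ih _ hlt1 (specFlash g q) p rfl hpf
        have e3 := ih _ hlt2 (specFlash g p) q rfl hqf
        have hcomm : specFlash (specFlash g q) p = specFlash (specFlash g p) q :=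
          flash_comm g q p hqp hq hp
        rw [e1, e2, e3, hcomm]

-- ===== the row-major rescan pass of A computes the same chaotic iteration =====
def RectSh (sh : List Nat) : Prop := ∀ x ∈ sh, x = sh.headD 0

def targetsOf (p : Int × Int) (ds : List (Int × Int)) : List (Int × Int) :=
  ds.map (fun d => (p.1 + d.1, p.2 + d.2))

theorem nodup_targets (p : Int × Int) (ds : List (Int × Int)) (h : ds.Nodup) :
    (targetsOf p ds).Nodup := by
  refine h.map ?_
  intro a b hab
  rcases a with ⟨a1, a2⟩
  rcases b with ⟨b1, b2⟩
  simp only [Prod.mk.injEq] at hab ⊢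
  omega

theorem mem_targets8 (p q : Int × Int) (ds : List (Int × Int))
    (hds : ds = adjA ∨ ds = nbrOffsets) : q ∈ targetsOf p ds ↔ nbrB p q = true := by
  rcases p with ⟨p1, p2⟩
  rcases q with ⟨q1, q2⟩
  rcases hds with h | h <;> subst h <;>
    simp [targetsOf, adjA, nbrOffsets, nbrB, Prod.mk.injEq, Bool.and_eq_true,
      bne_iff_ne, decide_eq_true_eq] <;>
    constructor <;> intro h <;> omega

theorem rect_row_len (g : List (List Int)) (hrect : RectSh (shape g)) (i : Nat)
    (hi : i < g.length) : (g.getD i []).length = (g.headD []).length := by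
  have hmem : (g.getD i []).length ∈ shape g := by
    simp only [shape, List.mem_map]
    exact ⟨g[i], List.getElem_mem hi, by simp [List.getD_eq_getElem?_getD, List.getElem?_eq_getElem hi]⟩
  have := hrect _ hmem
  rw [shape_headD] at this
  exact this

theorem nbrStepA_eq_incIf (p d : Int × Int) (g : List (List Int))
    (hrect : RectSh (shape g)) :
    nbrStepA p g d = incIf g (p.1 + d.1, p.2 + d.2) := by
  unfold nbrStepA incIf
  by_cases h1 : p.1 + d.1 < 0 ∨ (g.length : Int) ≤ p.1 + d.1
  · rw [if_pos h1]
    have h0 : cellI g (p.1 + d.1) (p.2 + d.2) = 0 :=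
      cellI_of_not_inR _ _ _ (by unfold InR; omega)
    simp [h0]
  · rw [if_neg h1]
    push Not at h1
    by_cases h2 : p.2 + d.2 < 0 ∨ ((g.headD []).length : Int) ≤ p.2 + d.2
    · rw [if_pos h2]
      have h0 : cellI g (p.1 + d.1) (p.2 + d.2) = 0 := by
        apply cellI_of_not_inR
        unfold InR
        intro ⟨ha, hb, hc, hd⟩
        rw [rect_row_len g hrect _ hb] at hd
        omega
      simp [h0]
    · rw [if_neg h2]
      by_cases h3 : cellI g (p.1 + d.1) (p.2 + d.2) = 0
      · simp [h3]
      · simp [h3]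

theorem foldA_eq_bumpList (p : Int × Int) (sh : List Nat) (hrect : RectSh sh) :
    ∀ (ds : List (Int × Int)) (g : List (List Int)), shape g = sh →
      ds.foldl (nbrStepA p) g = bumpList g (targetsOf p ds) := by
  intro ds
  induction ds with
  | nil => intro g hg; rfl
  | cons d ds ih =>
    intro g hg
    rw [List.foldl_cons]
    show (ds.foldl (nbrStepA p) (nbrStepA p g d)) = bumpList g (targetsOf p (d :: ds))
    rw [nbrStepA_eq_incIf p d g (hg ▸ hrect)]
    have : bumpList g (targetsOf p (d :: ds)) =
        bumpList (incIf g (p.1 + d.1, p.2 + d.2)) (targetsOf p ds) := by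
      rw [targetsOf, List.map_cons, bumpList, List.foldl_cons]
      rfl
    rw [this]
    exact ih _ (by rw [shape_incIf]; exact hg)

theorem adjA_nodup : adjA.Nodup := by decide

theorem nbrOffsets_nodup : nbrOffsets.Nodup := by decide

-- flashing one ready cell the way a port does it equals the closed-form flash
theorem bump_eq_specFlash (g : List (List Int)) (p : Int × Int)
    (hp : 9 < cellI g p.1 p.2) (ds : List (Int × Int))
    (hds : ds = adjA ∨ ds = nbrOffsets) (hnd : ds.Nodup) :
    bumpList (setCellI g p.1 p.2 0) (targetsOf p ds) = specFlash g p := by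
  have hInR : InR g p.1 p.2 := enabled_inR _ _ _ (by omega)
  have hsh0 : shape (setCellI g p.1 p.2 0) = shape g := shape_setCellI _ _ _ _
  apply grid_ext
  · rw [shape_bumpList, hsh0, shape_specFlash]
  · intro x y
    rw [bumpList_cell _ _ (nodup_targets p ds hnd), cellI_specFlash]
    by_cases hxp : (x, y) = p
    · have hpmem : (x, y) ∉ targetsOf p ds := by
        rw [mem_targets8 _ _ _ hds]
        subst hxp
        simp [nbrB]
      rw [if_neg (by intro hc; exact hpmem hc.1), if_pos hxp]
      have : cellI (setCellI g p.1 p.2 0) x y = 0 := by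
        rcases p with ⟨a, b⟩
        injection hxp with h1 h2
        subst h1; subst h2
        exact cellI_set_self _ _ _ _ hInR
      exact this
    · have hcell : cellI (setCellI g p.1 p.2 0) x y = cellI g x y := by
        apply cellI_set_ne
        rcases p with ⟨a, b⟩; exact hxp
      rw [hcell, if_neg hxp]
      have hmem := mem_targets8 p (x, y) ds hds
      rcases hb : nbrB p (x, y) <;> by_cases h0 : cellI g x y = 0 <;>
        simp [hmem, hb, h0]

theorem flashA_eq_specFlash (g : List (List Int)) (p : Int × Int)
    (hrect : RectSh (shape g)) (hp : 9 < cellI g p.1 p.2) :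
    adjA.foldl (nbrStepA p) (setCellI g p.1 p.2 0) = specFlash g p := by
  rw [foldA_eq_bumpList p (shape g) hrect adjA (setCellI g p.1 p.2 0) (shape_setCellI _ _ _ _)]
  exact bump_eq_specFlash g p hp adjA (Or.inl rfl) adjA_nodup

-- the pass preserves the shape and conserves the chaotic-iteration outcome
theorem passA_spec (sh : List Nat) (hrect : RectSh sh) :
    ∀ (l : List (Int × Int)) (g : List (List Int)) (n : Int), shape g = sh →
      shape (l.foldl passStepA (g, n)).1 = sh ∧
      (specStep (l.foldl passStepA (g, n)).1).1 = (specStep g).1 ∧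
      (specStep (l.foldl passStepA (g, n)).1).2 + (l.foldl passStepA (g, n)).2 =
        (specStep g).2 + n := by
  intro l
  induction l with
  | nil => intro g n hg; exact ⟨hg, rfl, rfl⟩
  | cons p l ih =>
    intro g n hg
    by_cases hp : 9 < cellI g p.1 p.2
    · have hstep : passStepA (g, n) p = (specFlash g p, n + 1) := by
        unfold passStepA
        rw [if_pos hp, flashA_eq_specFlash g p (hg ▸ hrect) hp]
      rw [List.foldl_cons, hstep]
      obtain ⟨ha, hb, hc⟩ := ih (specFlash g p) (n + 1) (by rw [shape_specFlash]; exact hg)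
      have hex := specStep_exchange (nonzeroCount g) g p rfl hp
      refine ⟨ha, ?_, ?_⟩
      · rw [hb, hex]
      · rw [hex]
        omega
    · have hstep : passStepA (g, n) p = (g, n) := by
        unfold passStepA; rw [if_neg hp]
      rw [List.foldl_cons, hstep]
      exact ih g n hg

theorem passA_mono : ∀ (l : List (Int × Int)) (g : List (List Int)) (n : Int),
    n ≤ (l.foldl passStepA (g, n)).2 := by
  intro l
  induction l with
  | nil => intro g n; exact le_refl n
  | cons p l ih =>
    intro g n
    rw [List.foldl_cons]
    by_cases hp : 9 < cellI g p.1 p.2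
    · have hstep : passStepA (g, n) p =
          (adjA.foldl (nbrStepA p) (setCellI g p.1 p.2 0), n + 1) := by
        unfold passStepA; rw [if_pos hp]
      rw [hstep]
      exact le_trans (by omega) (ih _ (n + 1))
    · have hstep : passStepA (g, n) p = (g, n) := by
        unfold passStepA; rw [if_neg hp]
      rw [hstep]
      exact ih g n

theorem passA_zero : ∀ (l : List (Int × Int)) (g : List (List Int)) (n : Int),
    (l.foldl passStepA (g, n)).2 = n →
    (l.foldl passStepA (g, n)).1 = g ∧ ∀ p ∈ l, ¬ (9 < cellI g p.1 p.2) := by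
  intro l
  induction l with
  | nil => intro g n _; exact ⟨rfl, by simp⟩
  | cons p l ih =>
    intro g n hc
    rw [List.foldl_cons] at hc ⊢
    by_cases hp : 9 < cellI g p.1 p.2
    · have hstep : passStepA (g, n) p =
          (adjA.foldl (nbrStepA p) (setCellI g p.1 p.2 0), n + 1) := by
        unfold passStepA; rw [if_pos hp]
      rw [hstep] at hc
      exact absurd hc (by have := passA_mono l (adjA.foldl (nbrStepA p) (setCellI g p.1 p.2 0)) (n + 1); omega)
    · have hstep : passStepA (g, n) p = (g, n) := by
        unfold passStepA; rw [if_neg hp]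
      rw [hstep] at hc ⊢
      obtain ⟨h1, h2⟩ := ih g n hc
      refine ⟨h1, ?_⟩
      intro q hq
      rcases List.mem_cons.mp hq with rfl | hq'
      · exact hp
      · exact h2 q hq'

theorem passA_nonzero (sh : List Nat) (hrect : RectSh sh) :
    ∀ (l : List (Int × Int)) (g : List (List Int)) (n : Int), shape g = sh →
      nonzeroCount (l.foldl passStepA (g, n)).1 ≤ nonzeroCount g ∧
      ((l.foldl passStepA (g, n)).2 ≠ n → nonzeroCount (l.foldl passStepA (g, n)).1 < nonzeroCount g) := by
  intro l
  induction l with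
  | nil => intro g n hg; exact ⟨le_refl _, fun h => absurd rfl h⟩
  | cons p l ih =>
    intro g n hg
    rw [List.foldl_cons]
    by_cases hp : 9 < cellI g p.1 p.2
    · have hstep : passStepA (g, n) p = (specFlash g p, n + 1) := by
        unfold passStepA
        rw [if_pos hp, flashA_eq_specFlash g p (hg ▸ hrect) hp]
      rw [hstep]
      obtain ⟨h1, _⟩ := ih (specFlash g p) (n + 1) (by rw [shape_specFlash]; exact hg)
      have h2 := nonzero_specFlash_lt g p hp
      exact ⟨by omega, fun _ => by omega⟩
    · have hstep : passStepA (g, n) p = (g, n) := by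
        unfold passStepA; rw [if_neg hp]
      rw [hstep]
      exact ih g n hg

theorem noEnabled_findEnabled_none (g : List (List Int))
    (h : ∀ p ∈ posList (shape g), ¬ (9 < cellI g p.1 p.2)) : findEnabled g = none := by
  apply List.find?_eq_none.mpr
  intro p hp
  simpa using h p hp

theorem loopA_spec (sh : List Nat) (hrect : RectSh sh) :
    ∀ (f : Nat) (g : List (List Int)) (acc : Int), shape g = sh → nonzeroCount g < f →
      loopA f g acc = ((specStep g).1, acc + (specStep g).2) := by
  intro f
  induction f with
  | zero => intro g acc _ h; omega
  | succ f ih =>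
    intro g acc hg hfuel
    rw [loopA]
    have hpass := passA_spec sh hrect (posList (shape g)) g 0 hg
    by_cases hz : (handleExplodes g).2 = 0
    · rw [if_pos hz]
      obtain ⟨h1, h2⟩ := passA_zero (posList (shape g)) g 0 hz
      have hnone : findEnabled g = none := noEnabled_findEnabled_none g h2
      rw [specStep_none g hnone]
      unfold handleExplodes
      rw [h1]
      simp
    · rw [if_neg hz]
      obtain ⟨ha, hb, hc⟩ := hpass
      have hdec := (passA_nonzero sh hrect (posList (shape g)) g 0 hg).2 hz
      rw [ih (handleExplodes g).1 (acc + (handleExplodes g).2) ha (by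
        unfold handleExplodes at *
        omega)]
      unfold handleExplodes at *
      rw [hb, Prod.mk.injEq]
      exact ⟨rfl, by omega⟩

-- ===== B's stack flood fill computes the same chaotic iteration =====
theorem flashStepB_eq (p d : Int × Int) (g : List (List Int)) (st : List (Int × Int)) :
    flashStepB p (g, st) d =
      (incIf g (p.1 + d.1, p.2 + d.2),
       if cellI g (p.1 + d.1) (p.2 + d.2) ≠ 0 ∧ 9 < cellI g (p.1 + d.1) (p.2 + d.2) + 1 then
         (p.1 + d.1, p.2 + d.2) :: st
       else st) := by
  unfold flashStepB incIf
  dsimp only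
  by_cases h0 : cellI g (p.1 + d.1) (p.2 + d.2) = 0
  · split_ifs <;> simp_all
  · have hInR := enabled_inR g _ _ h0
    unfold InR at hInR
    obtain ⟨ha, hb, hc, hd⟩ := hInR
    have hrow : (g.getD (p.1 + d.1).toNat []) = g[(p.1 + d.1).toNat]'hb := by
      simp [List.getD_eq_getElem?_getD, List.getElem?_eq_getElem hb]
    rw [hrow] at hd
    split_ifs <;> first
      | rfl
      | omega
      | (simp_all <;> omega)
theorem foldB_char (p : Int × Int) :
    ∀ (ds : List (Int × Int)) (g : List (List Int)) (st : List (Int × Int)),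
      (targetsOf p ds).Nodup →
      (ds.foldl (flashStepB p) (g, st)).1 = bumpList g (targetsOf p ds) ∧
      (∀ x ∈ st, x ∈ (ds.foldl (flashStepB p) (g, st)).2) ∧
      (∀ q ∈ targetsOf p ds, cellI g q.1 q.2 ≠ 0 → 9 < cellI g q.1 q.2 + 1 →
        q ∈ (ds.foldl (flashStepB p) (g, st)).2) ∧
      (ds.foldl (flashStepB p) (g, st)).2.length ≤ st.length + ds.length := by
  intro ds
  induction ds with
  | nil =>
    intro g st _
    exact ⟨rfl, fun x hx => hx, by simp [targetsOf], by simp⟩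
  | cons d ds ih =>
    intro g st hnd
    have htc : targetsOf p (d :: ds) = (p.1 + d.1, p.2 + d.2) :: targetsOf p ds := rfl
    rw [htc] at hnd
    have hq_notin : (p.1 + d.1, p.2 + d.2) ∉ targetsOf p ds := (List.nodup_cons.mp hnd).1
    have hnd' : (targetsOf p ds).Nodup := (List.nodup_cons.mp hnd).2
    rw [List.foldl_cons, flashStepB_eq]
    set q := (p.1 + d.1, p.2 + d.2) with hqdef
    set st' := (if cellI g q.1 q.2 ≠ 0 ∧ 9 < cellI g q.1 q.2 + 1 then q :: st else st) with hst'
    obtain ⟨ih1, ih2, ih3, ih4⟩ := ih (incIf g q) st' hnd'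
    refine ⟨?_, ?_, ?_, ?_⟩
    · rw [ih1, htc]
      rfl
    · intro x hx
      apply ih2
      rw [hst']
      split
      · exact List.mem_cons_of_mem _ hx
      · exact hx
    · intro r hr h0 h9
      rw [htc] at hr
      rcases List.mem_cons.mp hr with rfl | hr'
      · apply ih2
        rw [hst', if_pos ⟨h0, h9⟩]
        exact List.mem_cons_self
      · have hne : r ≠ q := fun hc => hq_notin (hc ▸ hr')
        have hcell : cellI (incIf g q) r.1 r.2 = cellI g r.1 r.2 := by
          apply cellI_incIf_ne
          rcases r with ⟨r1, r2⟩
          exact hne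
        exact ih3 r hr' (by rw [hcell]; exact h0) (by rw [hcell]; exact h9)
    · refine le_trans ih4 ?_
      have : st'.length ≤ st.length + 1 := by
        rw [hst']; split <;> simp
      simp only [List.length_cons]
      omega

theorem floodB_spec :
    ∀ (f : Nat) (g : List (List Int)) (st : List (Int × Int)) (total : Int),
      9 * nonzeroCount g + st.length < f →
      (∀ x y : Int, 9 < cellI g x y → (x, y) ∈ st) →
      floodB f (g, st) total = ((specStep g).1, total + (specStep g).2) := by
  intro f
  induction f with
  | zero => intro g st total h _; omega
  | succ f ih =>
    intro g st total hfuel hcov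
    cases st with
    | nil =>
      have hnone : findEnabled g = none := by
        apply noEnabled_findEnabled_none
        intro p _ hp
        exact absurd (hcov p.1 p.2 hp) (List.not_mem_nil)
      rw [specStep_none g hnone]
      show (g, total) = (g, total + 0)
      simp
    | cons p rest =>
      by_cases hp : cellI g p.1 p.2 ≤ 9
      · have heq : floodB (f + 1) (g, p :: rest) total = floodB f (g, rest) total := by
          rw [floodB, if_pos hp]
        rw [heq]
        apply ih g rest total (by simp at hfuel ⊢; omega)
        intro x y hxy
        rcases List.mem_cons.mp (hcov x y hxy) with heq2 | hmem
        · exfalso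
          rw [show p = (x, y) from heq2.symm] at hp
          simp at hp
          omega
        · exact hmem
      · push Not at hp
        have heq : floodB (f + 1) (g, p :: rest) total =
            floodB f (nbrOffsets.foldl (flashStepB p) (setCellI g p.1 p.2 0, rest)) (total + 1) := by
          rw [floodB, if_neg (by omega)]
        rw [heq]
        obtain ⟨hb1, hb2, hb3, hb4⟩ :=
          foldB_char p nbrOffsets (setCellI g p.1 p.2 0) rest
            (nodup_targets p nbrOffsets nbrOffsets_nodup)
        have hgrid : (nbrOffsets.foldl (flashStepB p) (setCellI g p.1 p.2 0, rest)).1 =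
            specFlash g p := by
          rw [hb1]
          exact bump_eq_specFlash g p hp nbrOffsets (Or.inr rfl) nbrOffsets_nodup
        have hnz : nonzeroCount (specFlash g p) < nonzeroCount g := nonzero_specFlash_lt g p hp
        have hex := specStep_exchange (nonzeroCount g) g p rfl hp
        rw [show (nbrOffsets.foldl (flashStepB p) (setCellI g p.1 p.2 0, rest)) =
            ((nbrOffsets.foldl (flashStepB p) (setCellI g p.1 p.2 0, rest)).1,
             (nbrOffsets.foldl (flashStepB p) (setCellI g p.1 p.2 0, rest)).2) from rfl,
          hgrid]
        rw [ih (specFlash g p) _ (total + 1) ?_ ?_]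
        · rw [hex]
          rw [Prod.mk.injEq]
          exact ⟨rfl, by omega⟩
        · -- fuel
          have hlen : (nbrOffsets.foldl (flashStepB p) (setCellI g p.1 p.2 0, rest)).2.length ≤
              rest.length + 8 := by
            simpa [nbrOffsets] using hb4
          simp only [List.length_cons] at hfuel
          omega
        · -- coverage
          intro x y hxy
          by_cases hxp : (x, y) = p
          · exfalso
            rcases p with ⟨p1, p2⟩
            injection hxp with h1 h2
            subst h1; subst h2
            have h0 : cellI (specFlash g (x, y)) x y = 0 := by
              have hh := cellI_specFlash g (x, y) x y
              rw [if_pos rfl] at hh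
              exact hh
            rw [h0] at hxy
            omega
          · have hcell := cellI_specFlash g p x y
            rw [if_neg hxp] at hcell
            have hset : cellI (setCellI g p.1 p.2 0) x y = cellI g x y := by
              apply cellI_set_ne
              rcases p with ⟨p1, p2⟩
              exact hxp
            by_cases hbump : (nbrB p (x, y) && (cellI g x y != 0)) = true
            · rw [if_pos hbump] at hcell
              by_cases hold : 9 < cellI g x y
              · -- was already ready: on the old stack
                rcases List.mem_cons.mp (hcov x y hold) with heq2 | hmem
                · exact absurd heq2.symm (fun hc => hxp hc.symm)
                · exact hb2 _ hmem
              · -- newly ready: pushed by the fold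
                apply hb3 (x, y)
                · rw [mem_targets8 p (x, y) nbrOffsets (Or.inr rfl)]
                  exact (Bool.and_eq_true .. ▸ hbump).1
                · rw [hset]
                  simp only [Bool.and_eq_true, bne_iff_ne] at hbump
                  exact hbump.2
                · rw [hset]
                  omega
            · rw [if_neg hbump] at hcell
              rw [hcell] at hxy
              rcases List.mem_cons.mp (hcov x y hxy) with heq2 | hmem
              · exact absurd heq2.symm (fun hc => hxp hc.symm)
              · exact hb2 _ hmem

-- the collection pass gathers every ready cell
theorem collect_cov (g1 : List (List Int)) :
    ∀ (l : List (Int × Int)) (st : List (Int × Int)) (q : Int × Int),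
      (q ∈ st ∨ (q ∈ l ∧ 9 < cellI g1 q.1 q.2)) →
      q ∈ l.foldl (fun st p => if 9 < cellI g1 p.1 p.2 then p :: st else st) st := by
  intro l
  induction l with
  | nil => intro st q h; rcases h with h | ⟨h, _⟩; exact h; cases h
  | cons p l ih =>
    intro st q h
    rw [List.foldl_cons]
    apply ih
    rcases h with h | ⟨hmem, h9⟩
    · left
      split
      · exact List.mem_cons_of_mem _ h
      · exact h
    · rcases List.mem_cons.mp hmem with rfl | hmem'
      · left
        rw [if_pos h9]
        exact List.mem_cons_self
      · right
        exact ⟨hmem', h9⟩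

-- ===== step equality and 100-round assembly =====
theorem shape_increaseAll (g : List (List Int)) : shape (increaseAll g) = shape g := by
  unfold shape increaseAll
  rw [List.map_map]
  apply List.map_congr_left
  intro row _
  simp

theorem specStep_shape : ∀ (n : Nat) (g : List (List Int)), nonzeroCount g = n →
    shape (specStep g).1 = shape g := by
  intro n
  induction n using Nat.strong_induction_on with
  | _ n ih =>
    intro g hn
    cases hfe : findEnabled g with
    | none => rw [specStep_none g hfe]
    | some p =>
      have hp := findEnabled_some_enabled g p hfe
      rw [specStep_some g p hfe]
      have hlt : nonzeroCount (specFlash g p) < n := hn ▸ nonzero_specFlash_lt g p hp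
      rw [ih _ hlt (specFlash g p) rfl, shape_specFlash]

-- one whole step (bump + settle) of each port, against the spec
theorem stepA_eq (g : List (List Int)) (hrect : RectSh (shape g)) :
    loopA (nonzeroCount (increaseAll g) + 1) (increaseAll g) 0 =
      ((specStep (increaseAll g)).1, 0 + (specStep (increaseAll g)).2) := by
  exact loopA_spec (shape g) hrect (nonzeroCount (increaseAll g) + 1) (increaseAll g) 0
    (shape_increaseAll g) (by omega)

theorem stepB_eq (g : List (List Int)) :
    floodB (9 * nonzeroCount (increaseAll g) +
        ((posList (shape (increaseAll g))).foldl
          (fun st p => if 9 < cellI (increaseAll g) p.1 p.2 then p :: st else st) []).length + 1)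
      (increaseAll g,
        (posList (shape (increaseAll g))).foldl
          (fun st p => if 9 < cellI (increaseAll g) p.1 p.2 then p :: st else st) []) 0 =
      ((specStep (increaseAll g)).1, 0 + (specStep (increaseAll g)).2) := by
  apply floodB_spec _ _ _ 0 (by omega)
  intro x y hxy
  apply collect_cov
  right
  refine ⟨?_, hxy⟩
  rw [← inR_iff_mem_posList]
  exact enabled_inR _ _ _ (by omega)

theorem rounds_eq : ∀ (l : List Nat) (g : List (List Int)) (t : Int),
    RectSh (shape g) →
    l.foldl (fun s (_ : Nat) =>
        let g1 := increaseAll s.1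
        let r := loopA (nonzeroCount g1 + 1) g1 0
        (r.1, s.2 + r.2)) (g, t) =
      l.foldl (fun s (_ : Nat) =>
        let g1 := s.1.map (fun row => row.map (· + 1))
        let st := (posList (shape g1)).foldl
          (fun st p => if 9 < cellI g1 p.1 p.2 then p :: st else st) ([] : List (Int × Int))
        let r := floodB (9 * nonzeroCount g1 + st.length + 1) (g1, st) 0
        (r.1, s.2 + r.2)) (g, t) := by
  intro l
  induction l with
  | nil => intro g t _; rfl
  | cons n l ih =>
    intro g t hrect
    rw [List.foldl_cons, List.foldl_cons]
    have hB : (g.map (fun row => row.map (· + 1))) = increaseAll g := rfl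
    simp only
    rw [stepA_eq g hrect, hB, stepB_eq g]
    apply ih
    rw [specStep_shape (nonzeroCount (increaseAll g)) (increaseAll g) rfl, shape_increaseAll]
    exact hrect

theorem pre_rect (lines : List (List Int))
    (h : ∀ row ∈ lines, row.length = (lines.headD []).length) : RectSh (shape lines) := by
  intro x hx
  unfold shape at hx
  rw [List.mem_map] at hx
  obtain ⟨row, hrow, rfl⟩ := hx
  rw [shape_headD]
  exact h row hrow

-- ===== the never-flashing case (kept ragged grids) =====
theorem cellI_increaseAll (g : List (List Int)) (x y : Int) (h : InR g x y) :
    cellI (increaseAll g) x y = cellI g x y + 1 := by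
  obtain ⟨hx0, hx, hy0, hy⟩ := h
  unfold cellI increaseAll
  rw [if_neg (by omega), if_neg (by omega)]
  simp [List.getD_eq_getElem?_getD, List.getElem?_map, List.getElem?_eq_getElem hx,
    List.getElem?_eq_getElem (show y.toNat < (g[x.toNat]'hx).length by
      simpa [List.getD_eq_getElem?_getD, List.getElem?_eq_getElem hx] using hy)]

theorem passA_noop (g : List (List Int)) :
    ∀ (l : List (Int × Int)) (n : Int), (∀ p ∈ l, ¬ 9 < cellI g p.1 p.2) →
      l.foldl passStepA (g, n) = (g, n) := by
  intro l
  induction l with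
  | nil => intro n _; rfl
  | cons p l ih =>
    intro n h
    rw [List.foldl_cons]
    have hstep : passStepA (g, n) p = (g, n) := by
      unfold passStepA
      rw [if_neg (h p List.mem_cons_self)]
    rw [hstep]
    exact ih n (fun q hq => h q (List.mem_cons_of_mem _ hq))

theorem collect_noop (g1 : List (List Int)) :
    ∀ (l : List (Int × Int)), (∀ p ∈ l, ¬ 9 < cellI g1 p.1 p.2) →
      l.foldl (fun st p => if 9 < cellI g1 p.1 p.2 then p :: st else st)
        ([] : List (Int × Int)) = [] := by
  have gen : ∀ (l : List (Int × Int)) (st : List (Int × Int)),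
      (∀ p ∈ l, ¬ 9 < cellI g1 p.1 p.2) →
      l.foldl (fun st p => if 9 < cellI g1 p.1 p.2 then p :: st else st) st = st := by
    intro l
    induction l with
    | nil => intro st _; rfl
    | cons p l ih =>
      intro st h
      rw [List.foldl_cons, if_neg (h p List.mem_cons_self)]
      exact ih st (fun q hq => h q (List.mem_cons_of_mem _ hq))
  intro l h
  exact gen l [] h

theorem rounds_eq_quiet : ∀ (l : List Nat) (g : List (List Int)) (t : Int),
    (∀ p ∈ posList (shape g), cellI g p.1 p.2 + (l.length : Int) ≤ 9) →
    l.foldl (fun s (_ : Nat) =>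
        let g1 := increaseAll s.1
        let r := loopA (nonzeroCount g1 + 1) g1 0
        (r.1, s.2 + r.2)) (g, t) =
      l.foldl (fun s (_ : Nat) =>
        let g1 := s.1.map (fun row => row.map (· + 1))
        let st := (posList (shape g1)).foldl
          (fun st p => if 9 < cellI g1 p.1 p.2 then p :: st else st) ([] : List (Int × Int))
        let r := floodB (9 * nonzeroCount g1 + st.length + 1) (g1, st) 0
        (r.1, s.2 + r.2)) (g, t) := by
  intro l
  induction l with
  | nil => intro g t _; rfl
  | cons n l ih =>
    intro g t hbound
    rw [List.foldl_cons, List.foldl_cons]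
    have hsh1 : shape (increaseAll g) = shape g := shape_increaseAll g
    have hquiet : ∀ p ∈ posList (shape (increaseAll g)),
        ¬ 9 < cellI (increaseAll g) p.1 p.2 := by
      intro p hp
      rw [hsh1] at hp
      have hin : InR g p.1 p.2 := (inR_iff_mem_posList g p.1 p.2).mpr hp
      rw [cellI_increaseAll g p.1 p.2 hin]
      have := hbound p hp
      simp only [List.length_cons] at this
      omega
    have hA : loopA (nonzeroCount (increaseAll g) + 1) (increaseAll g) 0 =
        (increaseAll g, 0) := by
      rw [loopA]
      unfold handleExplodes
      rw [passA_noop (increaseAll g) (posList (shape (increaseAll g))) 0 hquiet]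
      rfl
    have hB : (g.map (fun row => row.map (· + 1))) = increaseAll g := rfl
    simp only
    rw [hA, hB, collect_noop (increaseAll g) (posList (shape (increaseAll g))) hquiet]
    have hbound' : ∀ p ∈ posList (shape (increaseAll g)),
        cellI (increaseAll g) p.1 p.2 + (l.length : Int) ≤ 9 := by
      intro p hp
      rw [hsh1] at hp
      rw [cellI_increaseAll g p.1 p.2 ((inR_iff_mem_posList g p.1 p.2).mpr hp)]
      have := hbound p hp
      simp only [List.length_cons] at this
      omega
    rw [hsh1] at hbound'
    rw [← hsh1] at hbound'
    exact ih (increaseAll g) (t + 0) hbound'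

-- ===== VERDICT (by name: the statement is the Claim_ definition above) =====
theorem part_a_spec : Claim_equal_part_a := by
  intro lines _ hpre
  unfold Spec_part_a part_a part_a_alt
  rcases hpre with hrect | hneg
  · rw [rounds_eq (List.range 100) lines 0 (pre_rect lines hrect)]
  · rw [rounds_eq_quiet (List.range 100) lines 0 ?_]
    intro p hp
    have hin : InR lines p.1 p.2 := (inR_iff_mem_posList lines p.1 p.2).mpr hp
    obtain ⟨hx0, hx, hy0, hy⟩ := hin
    have hrow : lines[p.1.toNat]'hx ∈ lines := List.getElem_mem hx
    have hv : cellI lines p.1 p.2 ∈ lines[p.1.toNat]'hx := by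
      unfold cellI
      rw [if_neg (by omega)]
      simp only [List.getD_eq_getElem?_getD, List.getElem?_eq_getElem hx, Option.getD_some]
      have hy2 : p.2.toNat < (lines[p.1.toNat]'hx).length := by
        simpa [List.getD_eq_getElem?_getD, List.getElem?_eq_getElem hx] using hy
      rw [List.getElem?_eq_getElem hy2, Option.getD_some]
      exact List.getElem_mem hy2
    have := hneg _ hrow _ hv
    simp only [List.length_range]
    omega
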